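-- pv_equiv track=rewrite | github.com/KiwiDot/programmers | 코딩테스트 연습/코딩 기초 트레이닝/왼쪽 오른쪽/solution.py | solution
-- ===== SOURCE A (Python) =====
-- def solution(str_list):
--     answer = []
--     for i in range(len(str_list)):
--         if str_list[i] == 'l':
--             return str_list[:i]
--         if str_list[i] == 'r':
--             return str_list[i+1:]
--     return answer
-- ===== SOURCE B (Python) =====
-- def solution(str_list):
--     n = len(str_list)
--     li = str_list.index('l') if 'l' in str_list else n
--     ri = str_list.index('r') if 'r' in str_list else n
--     if li == n and ri == n:
--         return []
--     if li < ri: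
--         return str_list[:li]
--     return str_list[ri + 1:]
-- ===== Notes on version B (the rewrite author's own statement) =====
-- stated objective: alternative
-- what changed: Replaces the index-loop with early returns by computing the first positions of 'l' and 'r' up front (membership-guarded index with len as the absent sentinel) and then deciding by comparing the two positions.
import Mathlib
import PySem

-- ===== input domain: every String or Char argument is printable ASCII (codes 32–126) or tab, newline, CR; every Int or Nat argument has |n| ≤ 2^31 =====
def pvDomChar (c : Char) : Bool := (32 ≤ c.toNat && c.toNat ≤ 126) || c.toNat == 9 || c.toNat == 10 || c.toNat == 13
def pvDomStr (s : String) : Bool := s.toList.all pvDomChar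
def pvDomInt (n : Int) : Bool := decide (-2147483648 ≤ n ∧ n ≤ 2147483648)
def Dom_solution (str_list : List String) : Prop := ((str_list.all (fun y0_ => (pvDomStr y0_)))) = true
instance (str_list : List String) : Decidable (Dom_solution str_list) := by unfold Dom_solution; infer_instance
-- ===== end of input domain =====

-- B finds both candidate positions first (len as the absent sentinel), then decides; no early-return scan.

-- ===== PORT A =====
-- 'for i in range(len(str_list))' with early returns: recursion over the index list.
def solutionGo (str_list : List String) : List Int → List String
  | [] => []                                   -- loop ends: return answer = []
  | i :: rest =>
    if PySem.List.pyGetD str_list i "" = "l" then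
      PySem.List.slice str_list none (some i)          -- str_list[:i]
    else if PySem.List.pyGetD str_list i "" = "r" then
      PySem.List.slice str_list (some (i + 1)) none    -- str_list[i+1:]
    else solutionGo str_list rest

def solution (str_list : List String) : List String :=
  solutionGo str_list (PySem.List.pyRange 0 (str_list.length : Int) 1)

-- ===== PORT B =====
def solution_alt (str_list : List String) : List String :=
  let n : Nat := str_list.length
  let li : Nat := if "l" ∈ str_list then (PySem.List.index? str_list "l").getD 0 else n
  let ri : Nat := if "r" ∈ str_list then (PySem.List.index? str_list "r").getD 0 else n
  if li = n ∧ ri = n then []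
  else if li < ri then PySem.List.slice str_list none (some (li : Int))
  else PySem.List.slice str_list (some ((ri : Int) + 1)) none

-- ===== PRECONDITION & SPEC =====
def Spec_solution (str_list : List String) (out : List String) : Prop := out = solution_alt str_list
instance (str_list : List String) (out : List String) : Decidable (Spec_solution str_list out) := by unfold Spec_solution; infer_instance

-- ===== CLAIM (what is proved, stated in full; the proofs are below) =====
def Claim_equal_solution : Prop := ∀ (str_list : List String), Dom_solution str_list → Spec_solution str_list (solution str_list)

-- ===== LEMMAS AND PROOFS =====

-- membership-guarded first index with the absent-token sentinel (proof-only helper)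
def fidx (v : String) (l : List String) : Nat :=
  if v ∈ l then (PySem.List.index? l v).getD 0 else l.length

-- B's decision, phrased on a prefix/suffix split (proof-only helper).
def rhsB (xs ys : List String) : List String :=
  if fidx "l" ys = ys.length ∧ fidx "r" ys = ys.length then []
  else if fidx "l" ys < fidx "r" ys then xs ++ ys.take (fidx "l" ys)
  else ys.drop (fidx "r" ys + 1)

lemma fidx_cons_self (v : String) (ys : List String) : fidx v (v :: ys) = 0 := by
  rw [fidx, if_pos List.mem_cons_self, PySem.List.index?_cons_self]
  rfl

lemma fidx_cons_ne (v y : String) (ys : List String) (h : y ≠ v) :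
    fidx v (y :: ys) = fidx v ys + 1 := by
  by_cases hm : v ∈ ys
  · have hmc : v ∈ y :: ys := List.mem_cons_of_mem _ hm
    rw [fidx, fidx, if_pos hmc, if_pos hm, PySem.List.index?_cons_of_ne ys h]
    obtain ⟨k, hk⟩ := Option.isSome_iff_exists.mp ((PySem.List.index?_isSome_iff ys v).mpr hm)
    rw [hk]
    simp
  · have hmc : v ∉ y :: ys := by
      simp only [List.mem_cons, not_or]
      exact ⟨fun e => h e.symm, hm⟩
    rw [fidx, fidx, if_neg hmc, if_neg hm, List.length_cons]

lemma goA_eq_rhsB (ys xs : List String) :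
    solutionGo (xs ++ ys) (PySem.List.pyRange (xs.length : Int) ((xs ++ ys).length : Int) 1)
      = rhsB xs ys := by
  induction ys generalizing xs with
  | nil =>
    rw [PySem.List.pyRange_one_eq_nil (by simp)]
    simp [solutionGo, rhsB, fidx]
  | cons y ys ih =>
    rw [PySem.List.pyRange_one_cons (by push_cast [List.length_append, List.length_cons]; omega)]
    have hget : PySem.List.pyGetD (xs ++ y :: ys) (xs.length : Int) "" = y := by
      rw [PySem.List.pyGetD_eq_getElem (h0 := by positivity) (h1 := by push_cast [List.length_append, List.length_cons]; omega)]
      simp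
    by_cases hl : y = "l"
    · subst hl
      simp only [solutionGo]
      rw [if_pos hget, PySem.List.slice_to _ (by positivity)]
      rw [rhsB, fidx_cons_self, fidx_cons_ne "r" "l" ys (by decide)]
      rw [if_neg (by simp only [List.length_cons]; omega), if_pos (by omega)]
      simp
    · by_cases hr : y = "r"
      · subst hr
        simp only [solutionGo]
        rw [if_neg (by rw [hget]; exact hl), if_pos hget,
          PySem.List.slice_from _ (by positivity)]
        rw [rhsB, fidx_cons_self, fidx_cons_ne "l" "r" ys (by decide)]
        rw [if_neg (by simp only [List.length_cons]; omega), if_neg (by omega)]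
        have ht : ((xs.length : Int) + 1).toNat = xs.length + 1 := by omega
        rw [ht]
        simp [List.drop_append]
      · simp only [solutionGo]
        rw [if_neg (by rw [hget]; exact hl), if_neg (by rw [hget]; exact hr)]
        have e1 : xs ++ y :: ys = (xs ++ [y]) ++ ys := by simp
        have e2 : (xs.length : Int) + 1 = ((xs ++ [y]).length : Int) := by simp
        rw [e1, e2, ih (xs ++ [y])]
        rw [rhsB, rhsB, fidx_cons_ne "l" y ys hl, fidx_cons_ne "r" y ys hr]
        simp only [List.length_cons]
        by_cases hend : fidx "l" ys = ys.length ∧ fidx "r" ys = ys.length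
        · rw [if_pos hend, if_pos (show fidx "l" ys + 1 = ys.length + 1 ∧
            fidx "r" ys + 1 = ys.length + 1 by omega)]
        · rw [if_neg hend, if_neg (show ¬(fidx "l" ys + 1 = ys.length + 1 ∧
            fidx "r" ys + 1 = ys.length + 1) by omega)]
          by_cases hlt : fidx "l" ys < fidx "r" ys
          · rw [if_pos hlt, if_pos (show fidx "l" ys + 1 < fidx "r" ys + 1 by omega)]
            simp [List.take_succ_cons]
          · rw [if_neg hlt, if_neg (show ¬(fidx "l" ys + 1 < fidx "r" ys + 1) by omega)]
            simp [List.drop_succ_cons]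

theorem main (str_list : List String) : solution str_list = solution_alt str_list := by
  have h := goA_eq_rhsB str_list []
  simp only [List.nil_append, List.length_nil, Nat.cast_zero] at h
  rw [solution, h]
  rw [rhsB, solution_alt]
  simp only [fidx]
  rw [PySem.List.slice_to _ (by positivity), PySem.List.slice_from _ (by positivity)]
  have h1 : ((if "l" ∈ str_list then (PySem.List.index? str_list "l").getD 0
      else str_list.length : Nat) : Int).toNat
      = (if "l" ∈ str_list then (PySem.List.index? str_list "l").getD 0
      else str_list.length) := by omega
  have h2 : (((if "r" ∈ str_list then (PySem.List.index? str_list "r").getD 0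
      else str_list.length : Nat) : Int) + 1).toNat
      = (if "r" ∈ str_list then (PySem.List.index? str_list "r").getD 0
      else str_list.length) + 1 := by omega
  rw [h1, h2]
  simp

-- ===== VERDICT (by name: the statement is the Claim_ definition above) =====
theorem solution_spec : Claim_equal_solution := by
  intro l _
  exact main l
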